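-- pv_equiv track=rewrite | github.com/Khalyavin/Skypro | solve.py | solve
-- ===== SOURCE A (Python) =====
-- def solve(n :int, repeats: int):
--     """ Для n считает число повторов n + nn + nnn + ... repeat раз
--     """
--     str_out = str(n)
--     sum_list = [n]
--     if repeats > 1:
--         for i in range(1, repeats):
--             sum_list.append(sum_list[i-1] * 10 + n)
--             str_out += ' + ' + str(sum_list[i])
--
--     return str_out + ' = ' + str(sum(sum_list))
-- ===== SOURCE B (Python) =====
-- def solve(n: int, repeats: int):
--     count = repeats if repeats > 1 else 1
--     terms = [n * (10 ** k - 1) // 9 for k in range(1, count + 1)]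
--     return ' + '.join(str(t) for t in terms) + ' = ' + str(sum(terms))
-- ===== Notes on version B (the rewrite author's own statement) =====
-- stated objective: alternative
-- what changed: Each term is computed independently by the closed form n*(10**k-1)//9 and the output string is assembled once with ' + '.join, replacing A's running recurrence prev*10+n with its maintained list, indexed reads and string accumulator.
import Mathlib
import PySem

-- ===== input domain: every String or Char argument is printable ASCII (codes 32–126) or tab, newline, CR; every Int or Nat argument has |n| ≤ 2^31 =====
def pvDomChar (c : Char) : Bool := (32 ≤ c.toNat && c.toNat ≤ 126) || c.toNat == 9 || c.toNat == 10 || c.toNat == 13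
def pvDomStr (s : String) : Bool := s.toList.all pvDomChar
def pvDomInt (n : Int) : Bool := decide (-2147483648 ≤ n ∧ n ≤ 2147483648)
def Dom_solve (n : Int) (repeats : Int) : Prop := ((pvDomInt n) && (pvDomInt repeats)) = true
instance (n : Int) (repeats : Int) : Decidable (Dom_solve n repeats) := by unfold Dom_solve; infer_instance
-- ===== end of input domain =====

-- B replaces A's running recurrence (prev*10+n with a maintained list and string accumulator)
-- by the closed form term_k = n*(10^k-1)//9 per term, joined at the end; objective: alternative decomposition.

-- ===== PORT A =====
-- literal port of A: string accumulator + growing sum_list, loop over range(1, repeats);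
-- sum_list[i-1] / sum_list[i] are always in range, so pyGetD with default 0 is exact here
def solve (n : Int) (repeats : Int) : String :=
  let str_out := PySem.Int.toStr n
  let sum_list : List Int := [n]
  let st :=
    if repeats > 1 then
      (PySem.List.pyRange 1 repeats).foldl (fun (st : String × List Int) i =>
        let sum_list := st.2 ++ [PySem.List.pyGetD st.2 (i - 1) 0 * 10 + n]
        let str_out := st.1 ++ " + " ++ PySem.Int.toStr (PySem.List.pyGetD sum_list i 0)
        (str_out, sum_list)) (str_out, sum_list)
    else (str_out, sum_list)
  st.1 ++ " = " ++ PySem.Int.toStr st.2.sum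

-- ===== PORT B =====
-- port of Source B: count = repeats if repeats > 1 else 1; each term by closed form n*(10**k-1)//9
-- (k from range(1, count+1) satisfies k ≥ 1, so 10 ^ k.toNat is exactly Python's 10**k)
def solve_alt (n : Int) (repeats : Int) : String :=
  let count := if repeats > 1 then repeats else 1
  let terms := (PySem.List.pyRange 1 (count + 1)).map
    (fun k => PySem.Int.floordiv (n * (10 ^ k.toNat - 1)) 9)
  PySem.Str.join " + " (terms.map PySem.Int.toStr) ++ " = " ++ PySem.Int.toStr terms.sum

-- ===== PRECONDITION & SPEC =====
def Spec_solve (n : Int) (repeats : Int) (out : String) : Prop := out = solve_alt n repeats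
instance (n : Int) (repeats : Int) (out : String) : Decidable (Spec_solve n repeats out) := by unfold Spec_solve; infer_instance

-- ===== CLAIM (what is proved, stated in full; the proofs are below) =====
def Claim_equal_solve : Prop := ∀ (n : Int) (repeats : Int), Dom_solve n repeats → Spec_solve n repeats (solve n repeats)

-- ===== LEMMAS AND PROOFS =====

-- the closed-form term: n repeated k times as a decimal number (for k ≥ 1)
def pvTrm (n : Int) (k : Nat) : Int := PySem.Int.floordiv (n * (10 ^ k - 1)) 9

lemma pvNine_dvd (k : Nat) : (9 : Int) ∣ 10 ^ k - 1 := by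
  induction k with
  | zero => simp
  | succ k ih =>
    obtain ⟨c, hc⟩ := ih
    exact ⟨10 * c + 1, by rw [pow_succ]; omega⟩

lemma pvTrm_one (n : Int) : pvTrm n 1 = n := by
  unfold pvTrm
  rw [PySem.Int.floordiv_eq_ediv_of_pos (by norm_num)]
  norm_num

lemma pvTrm_succ (n : Int) (k : Nat) : pvTrm n (k + 1) = pvTrm n k * 10 + n := by
  obtain ⟨c, hc⟩ := pvNine_dvd k
  unfold pvTrm
  rw [PySem.Int.floordiv_eq_ediv_of_pos (by norm_num),
      PySem.Int.floordiv_eq_ediv_of_pos (by norm_num)]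
  have h1 : n * (10 ^ (k + 1) - 1) = 9 * (n * (10 * c + 1)) := by
    rw [pow_succ]; linear_combination (10 * n) * hc
  have h2 : n * (10 ^ k - 1) = 9 * (n * c) := by rw [hc]; ring
  rw [h1, h2, Int.mul_ediv_cancel_left _ (by norm_num), Int.mul_ediv_cancel_left _ (by norm_num)]
  ring

-- the list of the first m terms (m ≥ 1)
def pvTerms (n : Int) (m : Nat) : List Int := (List.range m).map (fun j => pvTrm n (j + 1))

lemma pvTerms_one (n : Int) : pvTerms n 1 = [n] := by
  simp [pvTerms, pvTrm_one]

lemma pvTerms_succ (n : Int) (m : Nat) : pvTerms n (m + 1) = pvTerms n m ++ [pvTrm n (m + 1)] := by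
  simp [pvTerms, List.range_succ]

lemma pvJoin_append (sep : List Char) (xs : List (List Char)) (x : List Char) (h : xs ≠ []) :
    PySem.Chars.join sep (xs ++ [x]) = PySem.Chars.join sep xs ++ sep ++ x := by
  induction xs with
  | nil => exact absurd rfl h
  | cons a tl ih =>
    cases tl with
    | nil => simp [PySem.Chars.join_cons_cons, PySem.Chars.join_singleton]
    | cons b rest =>
      have ih' := ih (by simp)
      simp only [List.cons_append] at ih' ⊢
      rw [PySem.Chars.join_cons_cons, ih', PySem.Chars.join_cons_cons]
      simp [List.append_assoc]

lemma pvStrJoin_append (sep : String) (xs : List String) (x : String) (h : xs ≠ []) :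
    PySem.Str.join sep (xs ++ [x]) = PySem.Str.join sep xs ++ sep ++ x := by
  unfold PySem.Str.join
  rw [List.map_append, List.map_singleton, pvJoin_append _ _ _ (by simpa using h)]
  simp [String.append_assoc]

-- loop invariant for A's for-loop: after processing range(1, k+1) the state is
-- (the " + "-joined strings of the first k+1 terms, the first k+1 terms)
lemma pvLoopA (n : Int) (k : Nat) :
    (PySem.List.pyRange 1 ((k : Int) + 1)).foldl (fun (st : String × List Int) i =>
        let sum_list := st.2 ++ [PySem.List.pyGetD st.2 (i - 1) 0 * 10 + n]
        let str_out := st.1 ++ " + " ++ PySem.Int.toStr (PySem.List.pyGetD sum_list i 0)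
        (str_out, sum_list)) (PySem.Int.toStr n, [n]) =
    (PySem.Str.join " + " ((pvTerms n (k + 1)).map PySem.Int.toStr), pvTerms n (k + 1)) := by
  induction k with
  | zero =>
    rw [show ((0 : Nat) : Int) + 1 = 1 by norm_num, PySem.List.pyRange_one_eq_nil le_rfl]
    rw [show pvTerms n (0 + 1) = [n] from pvTerms_one n]
    simp only [List.foldl_nil, List.map_singleton, PySem.Str.join,
      PySem.Chars.join_singleton, String.ofList_toList]
  | succ k ih =>
    rw [show ((k + 1 : Nat) : Int) + 1 = ((k : Int) + 1) + 1 by push_cast; ring,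
        PySem.List.pyRange_one_succ_right (by omega), List.foldl_append, ih]
    simp only [List.foldl_cons, List.foldl_nil]
    have hlen : (pvTerms n (k + 1)).length = k + 1 := by simp [pvTerms]
    have hlast : PySem.List.pyGetD (pvTerms n (k + 1)) ((k : Int) + 1 - 1) 0 = pvTrm n (k + 1) := by
      rw [show ((k : Int) + 1 - 1) = ((k : Nat) : Int) by ring, PySem.List.pyGetD_natCast]
      rw [List.getD_eq_getElem _ _ (by simp [pvTerms])]
      simp [pvTerms]
    simp only [hlast]
    have hnew : pvTerms n (k + 1) ++ [pvTrm n (k + 1) * 10 + n] = pvTerms n (k + 1 + 1) := by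
      rw [pvTerms_succ n (k + 1),
          show pvTrm n (k + 1 + 1) = pvTrm n (k + 1) * 10 + n from pvTrm_succ n (k + 1)]
    have hget2 : PySem.List.pyGetD (pvTerms n (k + 1 + 1)) ((k : Int) + 1) 0 = pvTrm n (k + 2) := by
      rw [show ((k : Int) + 1) = ((k + 1 : Nat) : Int) by push_cast; ring, PySem.List.pyGetD_natCast,
          List.getD_eq_getElem _ _ (by simp [pvTerms])]
      simp [pvTerms]
    rw [hnew, hget2]
    rw [pvTerms_succ n (k + 1), List.map_append, List.map_singleton,
        pvStrJoin_append _ _ _ (by simp [pvTerms])]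

-- B's term list over range(1, m+1) is exactly the list of the first m closed-form terms
lemma pvTermsB (n : Int) (m : Nat) :
    (PySem.List.pyRange 1 ((m : Int) + 1)).map
      (fun k => PySem.Int.floordiv (n * (10 ^ k.toNat - 1)) 9) = pvTerms n m := by
  rw [PySem.List.pyRange_one]
  rw [show ((m : Int) + 1 - 1).toNat = m by omega]
  simp only [List.map_map, pvTerms]
  apply List.map_congr_left
  intro j hj
  simp only [Function.comp_apply, pvTrm]
  rw [show ((1 : Int) + (j : Int)).toNat = j + 1 by omega]

-- ===== VERDICT (by name: the statement is the Claim_ definition above) =====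
theorem solve_spec : Claim_equal_solve := by
  intro n repeats _
  unfold Spec_solve solve solve_alt
  by_cases h : repeats > 1
  · simp only [if_pos h]
    have hk : repeats = ((repeats - 1).toNat : Int) + 1 := by omega
    set k := (repeats - 1).toNat with hkdef
    rw [hk, pvLoopA n k, show ((k : Int) + 1) + 1 = ((k + 1 : Nat) : Int) + 1 by push_cast; ring,
        pvTermsB n (k + 1)]
  · simp only [if_neg h]
    rw [show (1 : Int) + 1 = ((1 : Nat) : Int) + 1 by norm_num, pvTermsB n 1,
        show pvTerms n 1 = [n] from pvTerms_one n]
    simp only [List.map_singleton, PySem.Str.join, PySem.Chars.join_singleton,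
      String.ofList_toList, List.sum_cons, List.sum_nil, add_zero]
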